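-- pv_equiv track=rewrite | github.com/pypi-data/pypi-mirror-72 | packages/acsuite-orangechannel/acsuite_orangechannel-4.1.3-py3-none-any.whl/acsuite/__init__.py | _check_ordered
-- ===== SOURCE A (Python) =====
-- from typing import cast, Dict, List, Optional, Tuple, Union
--
-- def _check_ordered(a: List[int], b: List[int]) -> bool:
--     """Checks if lists follow logical python slicing."""
--     if len(a) != len(b):
--         raise ValueError('_check_ordered: lists must be same length')
--     if len(a) == 1 and len(b) == 1:
--         if a[0] >= b[0]:
--             return False
--
--     if not all(a[i] < a[i + 1] for i in range(len(a) - 1)):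
--         return False  # checks if list a is ordered L to G
--     if not all(b[i] < a[i + 1] for i in range(len(a) - 1)):
--         return False  # checks if all ends are less than next start
--     if not all(a[i] < b[i] for i in range(len(a))):
--         return False  # makes sure pair is at least one frame long
--
--     return True
-- ===== SOURCE B (Python) =====
-- def _check_ordered(a, b):
--     """Checks if lists follow logical python slicing."""
--     if len(a) != len(b):
--         raise ValueError('_check_ordered: lists must be same length')
--     prev_end = None
--     for start, end in zip(a, b):
--         if prev_end is not None and prev_end >= start:
--             return False  # each end must be before the next start
--         if start >= end:
--             return False  # each pair must be at least one frame long
--         prev_end = end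
--     return True
-- ===== Notes on version B (the rewrite author's own statement) =====
-- stated objective: simpler
-- what changed: Replaces the length-1 special case and three separate index-based all() scans with a single short-circuiting pass over zip(a, b) carrying only the previous end, checking start < end and prev_end < start; the a[i] < a[i+1] check is dropped because it follows by transitivity.
import Mathlib
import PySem

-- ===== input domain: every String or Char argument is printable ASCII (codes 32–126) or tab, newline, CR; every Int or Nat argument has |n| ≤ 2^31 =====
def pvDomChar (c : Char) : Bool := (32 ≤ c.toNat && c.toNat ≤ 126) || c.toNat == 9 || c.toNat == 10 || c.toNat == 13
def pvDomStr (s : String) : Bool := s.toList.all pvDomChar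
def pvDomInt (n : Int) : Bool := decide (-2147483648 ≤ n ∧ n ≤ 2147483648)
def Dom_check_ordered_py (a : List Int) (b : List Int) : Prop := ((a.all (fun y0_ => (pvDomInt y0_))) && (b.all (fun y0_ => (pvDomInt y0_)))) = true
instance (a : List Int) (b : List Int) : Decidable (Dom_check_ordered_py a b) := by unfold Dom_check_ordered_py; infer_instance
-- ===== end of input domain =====

-- B fuses A's length-1 special case and three index-based all() scans into one
-- short-circuiting pass over zip(a, b) carrying only the previous end (simpler; not faster).

-- ===== PORT A =====
-- literal transliteration of A: the ValueError branch is excluded by Pre_; then the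
-- length-1 special case, then the three range-based all() scans in A's order.
def check_ordered_py (a : List Int) (b : List Int) : Bool :=
  if a.length = 1 ∧ b.length = 1 then
    if a.getD 0 0 ≥ b.getD 0 0 then false else check_ordered_py_scans a b
  else check_ordered_py_scans a b
where
  check_ordered_py_scans (a b : List Int) : Bool :=
    if ¬ ((List.range (a.length - 1)).all fun i => decide (a.getD i 0 < a.getD (i + 1) 0)) then false
    else if ¬ ((List.range (a.length - 1)).all fun i => decide (b.getD i 0 < a.getD (i + 1) 0)) then false
    else if ¬ ((List.range a.length).all fun i => decide (a.getD i 0 < b.getD i 0)) then false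
    else true

-- ===== PORT B =====
-- B's loop: walk zip(a, b), carrying the previous pair's end (None before the first pair).
def check_ordered_py_alt_loop (prev : Option Int) (l : List (Int × Int)) : Bool :=
  match prev, l with
  | _, [] => true
  | none, (s, e) :: rest =>
    if s ≥ e then false else check_ordered_py_alt_loop (some e) rest
  | some p, (s, e) :: rest =>
    if p ≥ s then false
    else if s ≥ e then false
    else check_ordered_py_alt_loop (some e) rest

def check_ordered_py_alt (a : List Int) (b : List Int) : Bool :=
  if a.length ≠ b.length then false   -- A raises ValueError here; excluded by Pre_
  else check_ordered_py_alt_loop none (a.zip b)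

-- ===== PRECONDITION & SPEC =====
-- Pre_ excludes exactly the inputs of unequal length, on which A raises ValueError.
def Pre_check_ordered_py (a : List Int) (b : List Int) : Prop := a.length = b.length
instance (a : List Int) (b : List Int) : Decidable (Pre_check_ordered_py a b) := by
  unfold Pre_check_ordered_py; infer_instance
def pvWitness_check_ordered_py : List Int × List Int := ([0, 5], [3, 9])

def Spec_check_ordered_py (a : List Int) (b : List Int) (out : Bool) : Prop := out = check_ordered_py_alt a b
instance (a : List Int) (b : List Int) (out : Bool) : Decidable (Spec_check_ordered_py a b out) := by unfold Spec_check_ordered_py; infer_instance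

-- ===== CLAIM (what is proved, stated in full; the proofs are below) =====
def Claim_equal_check_ordered_py : Prop := ∀ (a : List Int) (b : List Int), Dom_check_ordered_py a b → Pre_check_ordered_py a b → Spec_check_ordered_py a b (check_ordered_py a b)

-- ===== LEMMAS AND PROOFS =====

-- A = true iff its three index conditions hold (given equal lengths).
theorem check_ordered_py_iff (a b : List Int) (hab : a.length = b.length) :
    check_ordered_py a b = true ↔
      ((∀ i, i + 1 < a.length → a.getD i 0 < a.getD (i + 1) 0) ∧
       (∀ i, i + 1 < a.length → b.getD i 0 < a.getD (i + 1) 0) ∧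
       (∀ i, i < a.length → a.getD i 0 < b.getD i 0)) := by
  have e1 : ((List.range (a.length - 1)).all fun i => decide (a.getD i 0 < a.getD (i + 1) 0)) = true
      ↔ (∀ i, i + 1 < a.length → a.getD i 0 < a.getD (i + 1) 0) := by
    simp only [List.all_eq_true, List.mem_range, decide_eq_true_eq]
    exact ⟨fun h i hi => h i (by omega), fun h i hi => h i (by omega)⟩
  have e2 : ((List.range (a.length - 1)).all fun i => decide (b.getD i 0 < a.getD (i + 1) 0)) = true
      ↔ (∀ i, i + 1 < a.length → b.getD i 0 < a.getD (i + 1) 0) := by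
    simp only [List.all_eq_true, List.mem_range, decide_eq_true_eq]
    exact ⟨fun h i hi => h i (by omega), fun h i hi => h i (by omega)⟩
  have e3 : ((List.range a.length).all fun i => decide (a.getD i 0 < b.getD i 0)) = true
      ↔ (∀ i, i < a.length → a.getD i 0 < b.getD i 0) := by
    simp only [List.all_eq_true, List.mem_range, decide_eq_true_eq]
  have hscan : check_ordered_py.check_ordered_py_scans a b = true ↔
      ((∀ i, i + 1 < a.length → a.getD i 0 < a.getD (i + 1) 0) ∧
       (∀ i, i + 1 < a.length → b.getD i 0 < a.getD (i + 1) 0) ∧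
       (∀ i, i < a.length → a.getD i 0 < b.getD i 0)) := by
    simp only [check_ordered_py.check_ordered_py_scans]
    by_cases h1 : ((List.range (a.length - 1)).all
        fun i => decide (a.getD i 0 < a.getD (i + 1) 0)) = true
    · rw [if_neg (not_not_intro h1)]
      by_cases h2 : ((List.range (a.length - 1)).all
          fun i => decide (b.getD i 0 < a.getD (i + 1) 0)) = true
      · rw [if_neg (not_not_intro h2)]
        by_cases h3 : ((List.range a.length).all
            fun i => decide (a.getD i 0 < b.getD i 0)) = true
        · rw [if_neg (not_not_intro h3)]
          constructor
          · intro _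
            exact ⟨e1.mp h1, e2.mp h2, e3.mp h3⟩
          · intro _
            rfl
        · rw [if_pos h3]
          constructor
          · intro h
            simp at h
          · rintro ⟨_, _, c3⟩
            exact absurd (e3.mpr c3) h3
      · rw [if_pos h2]
        constructor
        · intro h
          simp at h
        · rintro ⟨_, c2, _⟩
          exact absurd (e2.mpr c2) h2
    · rw [if_pos h1]
      constructor
      · intro h
        simp at h
      · rintro ⟨c1, _, _⟩
        exact absurd (e1.mpr c1) h1
  unfold check_ordered_py
  split_ifs with hlen h0
  · constructor
    · intro h
      simp at h
    · rintro ⟨_, _, c3⟩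
      exact absurd (c3 0 (by omega)) (not_lt.mpr h0)
  · exact hscan
  · exact hscan

-- B's loop = head condition on prev + all pairs ordered + chain of ends before next starts.
theorem check_ordered_py_alt_loop_iff (prev : Option Int) (l : List (Int × Int)) :
    check_ordered_py_alt_loop prev l = true ↔
      ((∀ p ∈ prev, ∀ x ∈ l.head?, p < x.1) ∧ (∀ x ∈ l, x.1 < x.2) ∧
        l.IsChain (fun x y => x.2 < y.1)) := by
  induction l generalizing prev with
  | nil => cases prev <;> simp [check_ordered_py_alt_loop]
  | cons x rest ih =>
    obtain ⟨s, e⟩ := x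
    have hrest := ih (some e)
    cases prev with
    | none =>
      rw [show check_ordered_py_alt_loop none ((s, e) :: rest) =
        (if s ≥ e then false else check_ordered_py_alt_loop (some e) rest) from rfl]
      by_cases hse : s ≥ e
      · rw [if_pos hse]
        constructor
        · intro h
          simp at h
        · rintro ⟨_, hp, _⟩
          exact absurd (hp (s, e) (by simp)) (not_lt.mpr hse)
      · rw [if_neg hse, hrest, List.isChain_cons]
        constructor
        · rintro ⟨hh, hp, hc⟩
          refine ⟨?_, ?_, ?_, hc⟩
          · intro p hp'
            simp at hp'
          · intro y hy
            rcases List.mem_cons.mp hy with rfl | hy'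
            · exact lt_of_not_ge hse
            · exact hp y hy'
          · intro y hy
            exact hh e rfl y hy
        · rintro ⟨_, hp, hh, hc⟩
          refine ⟨?_, ?_, hc⟩
          · intro p hp' x hx
            cases hp'
            exact hh x hx
          · intro y hy
            exact hp y (List.mem_cons_of_mem _ hy)
    | some p =>
      rw [show check_ordered_py_alt_loop (some p) ((s, e) :: rest) =
        (if p ≥ s then false
         else if s ≥ e then false
         else check_ordered_py_alt_loop (some e) rest) from rfl]
      by_cases hps : p ≥ s
      · rw [if_pos hps]
        constructor
        · intro h
          simp at h
        · rintro ⟨hq, _, _⟩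
          exact absurd (hq p rfl (s, e) rfl) (not_lt.mpr hps)
      · rw [if_neg hps]
        by_cases hse : s ≥ e
        · rw [if_pos hse]
          constructor
          · intro h
            simp at h
          · rintro ⟨_, hp', _⟩
            exact absurd (hp' (s, e) (by simp)) (not_lt.mpr hse)
        · rw [if_neg hse, hrest, List.isChain_cons]
          constructor
          · rintro ⟨hh, hp', hc⟩
            refine ⟨?_, ?_, ?_, hc⟩
            · intro q hq x hx
              cases hq
              cases hx
              exact lt_of_not_ge hps
            · intro y hy
              rcases List.mem_cons.mp hy with rfl | hy'
              · exact lt_of_not_ge hse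
              · exact hp' y hy'
            · intro y hy
              exact hh e rfl y hy
          · rintro ⟨_, hp', hh, hc⟩
            refine ⟨?_, ?_, hc⟩
            · intro q hq x hx
              cases hq
              exact hh x hx
            · intro y hy
              exact hp' y (List.mem_cons_of_mem _ hy)

-- B = true iff its two index conditions hold (given equal lengths).
theorem check_ordered_py_alt_iff (a b : List Int) (hab : a.length = b.length) :
    check_ordered_py_alt a b = true ↔
      ((∀ i, i < a.length → a.getD i 0 < b.getD i 0) ∧
       (∀ i, i + 1 < a.length → b.getD i 0 < a.getD (i + 1) 0)) := by
  have hzlen : (a.zip b).length = a.length := by simp [hab]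
  unfold check_ordered_py_alt
  rw [if_neg (not_not_intro hab), check_ordered_py_alt_loop_iff, List.isChain_iff_getElem]
  simp only [hzlen]
  constructor
  · rintro ⟨_, hp, hc⟩
    constructor
    · intro i hi
      have hx := hp ((a.zip b)[i]'(by omega)) (List.getElem_mem (by omega))
      rw [List.getElem_zip] at hx
      rwa [List.getD_eq_getElem a 0 hi, List.getD_eq_getElem b 0 (by omega)]
    · intro i hi
      have hx := hc i (by omega)
      rw [List.getElem_zip, List.getElem_zip] at hx
      rwa [List.getD_eq_getElem b 0 (by omega), List.getD_eq_getElem a 0 (by omega)]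
  · rintro ⟨h1, h2⟩
    refine ⟨?_, ?_, ?_⟩
    · intro p hp
      simp at hp
    · intro x hx
      obtain ⟨i, hi, rfl⟩ := List.mem_iff_getElem.mp hx
      rw [List.getElem_zip]
      have hlt := h1 i (by omega)
      rwa [List.getD_eq_getElem a 0 (by omega), List.getD_eq_getElem b 0 (by omega)] at hlt
    · intro i hi
      rw [List.getElem_zip, List.getElem_zip]
      have hlt := h2 i (by omega)
      rwa [List.getD_eq_getElem b 0 (by omega), List.getD_eq_getElem a 0 (by omega)] at hlt

-- ===== VERDICT (by name: the statement is the Claim_ definition above) =====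
theorem check_ordered_py_spec : Claim_equal_check_ordered_py := by
  intro a b _ hpre
  unfold Spec_check_ordered_py
  rw [Bool.eq_iff_iff, check_ordered_py_iff a b hpre, check_ordered_py_alt_iff a b hpre]
  constructor
  · rintro ⟨_, c2, c3⟩
    exact ⟨c3, c2⟩
  · rintro ⟨c3, c2⟩
    refine ⟨fun i hi => ?_, c2, c3⟩
    have h1 := c3 i (by omega)
    have h2 := c2 i hi
    omega
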